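-- pv_equiv track=rewrite | github.com/dandritsanos/Traveling-Tournament-Problem | BNP_NLX.py | tour_travel_cost
-- ===== SOURCE A (Python) =====
-- def tour_travel_cost(team, opponents, HA, D):
--     prev = team
--     total = 0
--     for opp, ha in zip(opponents, HA):
--         venue = team if ha == 'H' else opp
--         total += D[prev][venue]
--         prev = venue
--     total += D[prev][team]
--     return total
-- ===== SOURCE B (Python) =====
-- def tour_travel_cost(team, opponents, HA, D):
--     # Recursive, right-to-left: go(rounds) returns (venue of the first round
--     # of this suffix, or home if empty; travel cost from that venue to the end,
--     # including the final trip home). A instead loops left-to-right threading prev.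
--     def go(rounds):
--         if not rounds:
--             return team, 0
--         opp, ha = rounds[0]
--         v = team if ha == 'H' else opp
--         nxt, rest = go(rounds[1:])
--         return v, D[v][nxt] + rest
--     first, cost = go(list(zip(opponents, HA)))
--     return D[team][first] + cost
-- ===== Notes on version B (the rewrite author's own statement) =====
-- stated objective: alternative
-- what changed: Replaces A's front-to-back loop that threads the previous venue through an accumulator with a back-to-front structural recursion whose helper returns, for each suffix of rounds, the pair (first venue of the suffix, suffix travel cost including the final trip home); each edge cost is charged at the venue it leaves, in reverse order.
import Mathlib
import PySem

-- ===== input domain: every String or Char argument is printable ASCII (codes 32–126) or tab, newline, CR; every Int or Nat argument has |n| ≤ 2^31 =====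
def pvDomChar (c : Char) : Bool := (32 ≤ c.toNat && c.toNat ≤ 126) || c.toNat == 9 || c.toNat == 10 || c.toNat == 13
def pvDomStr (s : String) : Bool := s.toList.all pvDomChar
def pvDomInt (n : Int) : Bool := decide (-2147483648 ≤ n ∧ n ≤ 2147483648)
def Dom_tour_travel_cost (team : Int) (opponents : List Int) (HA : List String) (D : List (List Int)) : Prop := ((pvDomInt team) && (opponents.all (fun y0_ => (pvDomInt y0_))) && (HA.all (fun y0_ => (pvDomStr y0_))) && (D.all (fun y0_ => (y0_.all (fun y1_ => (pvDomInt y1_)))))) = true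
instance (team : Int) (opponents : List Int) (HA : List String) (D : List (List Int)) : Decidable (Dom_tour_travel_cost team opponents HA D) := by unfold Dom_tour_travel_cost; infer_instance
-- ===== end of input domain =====

-- B replaces A's front-to-back prev-threading loop by a back-to-front structural
-- recursion returning (first venue of the suffix, suffix cost incl. the trip home)
-- (objective: alternative decomposition, same cost).

-- D[a][b] (Python indexing; 0 when Python would raise IndexError — Pre_ excludes that)
def pvDget (D : List (List Int)) (a b : Int) : Int :=
  ((PySem.List.pyGet? D a).bind (fun row => PySem.List.pyGet? row b)).getD 0

-- venue of one round: team if ha == 'H' else opp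
def pvVenue (team : Int) (p : Int × String) : Int := if p.2 == "H" then team else p.1

-- ===== PORT A =====
def tour_travel_cost (team : Int) (opponents : List Int) (HA : List String) (D : List (List Int)) : Int :=
  let s := (opponents.zip HA).foldl
    (fun (s : Int × Int) p => (pvVenue team p, s.2 + pvDget D s.1 (pvVenue team p)))
    (team, 0)
  s.2 + pvDget D s.1 team

-- ===== PORT B =====
-- go(rounds) = (venue of first round, or team if none; cost from there to the end)
def pvGo (team : Int) (D : List (List Int)) : List (Int × String) → Int × Int
  | [] => (team, 0)
  | p :: t =>
      let v := pvVenue team p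
      let r := pvGo team D t
      (v, pvDget D v r.1 + r.2)

def tour_travel_cost_alt (team : Int) (opponents : List Int) (HA : List String) (D : List (List Int)) : Int :=
  let r := pvGo team D (opponents.zip HA)
  pvDget D team r.1 + r.2

-- ===== PRECONDITION & SPEC =====
-- Pre_ admits exactly the inputs on which A raises no IndexError: every consecutive pair
-- (a, b) of the venue path (home venue, per-round venues, home venue) must be a valid
-- Python lookup D[a][b] (negative indices count from the end, as in Python).
def pvOkIdx (D : List (List Int)) (q : Int × Int) : Bool :=
  decide (PySem.Raise.InRange D.length q.1) &&
  decide (PySem.Raise.InRange ((PySem.List.pyGet? D q.1).getD []).length q.2)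

def Pre_tour_travel_cost (team : Int) (opponents : List Int) (HA : List String) (D : List (List Int)) : Prop :=
  ∀ q ∈ ((team :: ((opponents.zip HA).map (pvVenue team) ++ [team])).zip
           (((opponents.zip HA).map (pvVenue team)) ++ [team])), pvOkIdx D q
instance (team : Int) (opponents : List Int) (HA : List String) (D : List (List Int)) : Decidable (Pre_tour_travel_cost team opponents HA D) := by unfold Pre_tour_travel_cost; infer_instance

def pvWitness_tour_travel_cost : Int × List Int × List String × List (List Int) :=
  (0, [1, 2], ["A", "H"], [[0, 4, 6], [4, 0, 3], [6, 3, 0]])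

def Spec_tour_travel_cost (team : Int) (opponents : List Int) (HA : List String) (D : List (List Int)) (out : Int) : Prop := out = tour_travel_cost_alt team opponents HA D
instance (team : Int) (opponents : List Int) (HA : List String) (D : List (List Int)) (out : Int) : Decidable (Spec_tour_travel_cost team opponents HA D out) := by unfold Spec_tour_travel_cost; infer_instance

-- ===== CLAIM (what is proved, stated in full; the proofs are below) =====
def Claim_equal_tour_travel_cost : Prop := ∀ (team : Int) (opponents : List Int) (HA : List String) (D : List (List Int)), Dom_tour_travel_cost team opponents HA D → Pre_tour_travel_cost team opponents HA D → Spec_tour_travel_cost team opponents HA D (tour_travel_cost team opponents HA D)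

-- ===== LEMMAS AND PROOFS =====

-- A's left fold from (prev, total) equals total + edge from prev into B's suffix result.
theorem pv_loop_go (team : Int) (D : List (List Int)) :
    ∀ (l : List (Int × String)) (prev total : Int),
      (let s := l.foldl
          (fun (s : Int × Int) p => (pvVenue team p, s.2 + pvDget D s.1 (pvVenue team p)))
          (prev, total)
       s.2 + pvDget D s.1 team)
      = total + pvDget D prev (pvGo team D l).1 + (pvGo team D l).2 := by
  intro l
  induction l with
  | nil => intro prev total; simp [pvGo]
  | cons p t ih =>
      intro prev total
      simp only [List.foldl_cons, pvGo]
      rw [ih (pvVenue team p) (total + pvDget D prev (pvVenue team p))]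
      ring

-- ===== VERDICT (by name: the statement is the Claim_ definition above) =====
theorem tour_travel_cost_spec : Claim_equal_tour_travel_cost := by
  intro team opponents HA D _ _
  unfold Spec_tour_travel_cost tour_travel_cost tour_travel_cost_alt
  simpa using pv_loop_go team D (opponents.zip HA) team 0
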